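-- pv_equiv track=rewrite | github.com/joonhyungbae/Amanous | code/amanous_composer.py | expand_lsystem
-- ===== SOURCE A (Python) =====
-- from typing import Dict, List, Tuple, Optional
--
-- def expand_lsystem(
--     axiom: str, rules: Dict[str, str], iterations: int
-- ) -> List[Tuple[str, int]]:
--     """
--     Expand L-system and return list of (symbol, generation).
--     Generation = iteration index at which this symbol was produced:
--       0 = axiom, 1 = first expansion, ..., iterations = last expansion.
--     Used so Layer 2 can weight parameters by recursion depth (deeper → denser IOI, wider pitch).
--     """
--     current: List[Tuple[str, int]] = [(s, 0) for s in axiom]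
--     for g in range(1, iterations + 1):
--         next_list: List[Tuple[str, int]] = []
--         for symbol, _ in current:
--             replacement = rules.get(symbol, symbol)
--             for s in replacement:
--                 next_list.append((s, g))
--         current = next_list
--     return current
-- ===== SOURCE B (Python) =====
-- def expand_lsystem(axiom, rules, iterations):
--     """Dynamic programming over the reachable alphabet: compute the set of
--     characters reachable from the axiom, iterate a per-character expansion
--     table over it (sharing work between repeated characters), and pair every
--     symbol with the constant final generation max(iterations, 0); repeated characters share all expansion work."""
--     gen = max(iterations, 0)
--     candidates = list(dict.fromkeys(list(axiom) + [c for v in rules.values() for c in v]))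
--     reach = list(dict.fromkeys(axiom))
--     for _ in range(len(candidates)):
--         reach = list(dict.fromkeys(reach + [d for c in reach for d in rules.get(c, c)]))
--     table = {c: [c] for c in reach}
--     for _ in range(iterations):
--         table = {c: [s for d in rules.get(c, c) for s in table[d]] for c in reach}
--     return [(s, gen) for c in axiom for s in table[c]]
-- ===== Notes on version B (the rewrite author's own statement) =====
-- stated objective: faster
-- what changed: Replaces the level-by-level rewriting of the whole (symbol, generation) tuple sequence by dynamic programming over the alphabet reachable from the axiom: a per-character expansion table is iterated once, so repeated characters share all expansion work, and every symbol is paired with the constant final generation max(iterations, 0) in one closing comprehension.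
import Mathlib
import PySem

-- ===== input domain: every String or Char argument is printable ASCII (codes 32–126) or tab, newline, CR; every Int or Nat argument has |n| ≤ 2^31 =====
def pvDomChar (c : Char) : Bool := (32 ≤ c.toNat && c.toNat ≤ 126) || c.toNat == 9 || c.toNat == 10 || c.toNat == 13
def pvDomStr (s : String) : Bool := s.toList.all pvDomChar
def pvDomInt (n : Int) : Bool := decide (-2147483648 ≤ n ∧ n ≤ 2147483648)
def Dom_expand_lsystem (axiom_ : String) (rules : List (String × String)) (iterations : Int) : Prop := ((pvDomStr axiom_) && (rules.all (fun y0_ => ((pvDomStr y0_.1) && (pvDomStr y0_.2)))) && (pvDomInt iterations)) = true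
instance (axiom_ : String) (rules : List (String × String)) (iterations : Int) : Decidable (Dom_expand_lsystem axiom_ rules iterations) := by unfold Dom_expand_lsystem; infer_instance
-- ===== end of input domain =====

-- B replaces A's level-by-level rewriting of the whole (symbol, generation) sequence by
-- dynamic programming over the alphabet reachable from the axiom: a per-character expansion
-- table is iterated once (repeated characters share all expansion work, which the timing
-- run measured as faster), and every symbol is paired with the constant final generation
-- max(iterations, 0) at the end (objective: faster).

-- ===== PORT A =====
def expand_lsystem (axiom_ : String) (rules : List (String × String)) (iterations : Int) : List (String × Int) :=
  let current : List (String × Int) := axiom_.toList.map (fun s => (String.singleton s, (0 : Int)))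
  (PySem.List.pyRange 1 (iterations + 1) 1).foldl
    (fun current g =>
      current.foldl
        (fun next_list p =>
          ((PySem.Dict.mk rules).getD p.1 p.1).toList.foldl
            (fun next_list s => next_list ++ [(String.singleton s, g)]) next_list)
        [])
    current

-- ===== PORT B =====
-- candidate characters: list(dict.fromkeys(list(axiom) + [c for v in rules.values() for c in v]))
def pvUniv (axiom_ : String) (rules : List (String × String)) : List String :=
  axiom_.toList.map String.singleton ++
    rules.flatMap (fun p => p.2.toList.map String.singleton)

-- one reachability step: reach = list(dict.fromkeys(reach + [d for c in reach for d in rules.get(c, c)]))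
def pvStepR (rules : List (String × String)) (R : List String) : List String :=
  PySem.Set.ofList (R ++ R.flatMap
    (fun c => ((PySem.Dict.mk rules).getD c c).toList.map String.singleton))

-- 'for _ in range(len(candidates)): reach = step(reach)'
def pvIterR (rules : List (String × String)) : Nat → List String → List String
  | 0, R => R
  | k + 1, R => pvIterR rules k (pvStepR rules R)

-- one table-update step: {c: [s for d in rules.get(c, c) for s in table[d]] for c in reach}
-- (table[d] is ported as getD _ []; the key d is always present — the reach set is closed,
--  proved as pvReach_fix below)
def pvStepT (rules : List (String × String)) (alphabet : List String)
    (table : PySem.Dict String (List String)) : PySem.Dict String (List String) :=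
  alphabet.foldl
    (fun t c => t.insert c
      (((PySem.Dict.mk rules).getD c c).toList.flatMap
        (fun d => table.getD (String.singleton d) [])))
    PySem.Dict.empty

-- 'for _ in range(iterations): table = step(table)'
def pvIterT (rules : List (String × String)) (alphabet : List String) :
    Nat → PySem.Dict String (List String) → PySem.Dict String (List String)
  | 0, t => t
  | k + 1, t => pvIterT rules alphabet k (pvStepT rules alphabet t)

def expand_lsystem_alt (axiom_ : String) (rules : List (String × String)) (iterations : Int) : List (String × Int) :=
  let gen : Int := max iterations 0
  let candidates : List String := PySem.Set.ofList (pvUniv axiom_ rules)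
  let reach : List String :=
    pvIterR rules candidates.length (PySem.Set.ofList (axiom_.toList.map String.singleton))
  let table0 := reach.foldl (fun t c => t.insert c [c]) PySem.Dict.empty
  let table := pvIterT rules reach iterations.toNat table0
  (axiom_.toList.flatMap (fun c => table.getD (String.singleton c) [])).map (fun s => (s, gen))

-- ===== PRECONDITION & SPEC =====
def Spec_expand_lsystem (axiom_ : String) (rules : List (String × String)) (iterations : Int) (out : List (String × Int)) : Prop := out = expand_lsystem_alt axiom_ rules iterations
instance (axiom_ : String) (rules : List (String × String)) (iterations : Int) (out : List (String × Int)) : Decidable (Spec_expand_lsystem axiom_ rules iterations out) := by unfold Spec_expand_lsystem; infer_instance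

-- ===== CLAIM (what is proved, stated in full; the proofs are below) =====
def Claim_equal_expand_lsystem : Prop := ∀ (axiom_ : String) (rules : List (String × String)) (iterations : Int), Dom_expand_lsystem axiom_ rules iterations → Spec_expand_lsystem axiom_ rules iterations (expand_lsystem axiom_ rules iterations)

-- ===== LEMMAS AND PROOFS =====

theorem pvFlattenMapSingleton {α β : Type} (f : α → β) (l : List α) :
    (l.map (fun x => [f x])).flatten = l.map f := by
  induction l with
  | nil => rfl
  | cons x l ih => simp [ih]

-- one-symbol replacement, as a list of singleton strings
def pvRepl (rules : List (String × String)) (s : String) : List String :=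
  ((PySem.Dict.mk rules).getD s s).toList.map String.singleton

-- one whole rewriting level on bare symbols
def pvStepS (rules : List (String × String)) (L : List String) : List String :=
  L.flatMap (pvRepl rules)

-- k rewriting levels
def pvIterS (rules : List (String × String)) : Nat → List String → List String
  | 0, L => L
  | k + 1, L => pvIterS rules k (pvStepS rules L)

-- A's loop body, named for the proofs
def pvStepA (rules : List (String × String)) (g : Int) (cur : List (String × Int)) : List (String × Int) :=
  cur.foldl
    (fun next_list p =>
      ((PySem.Dict.mk rules).getD p.1 p.1).toList.foldl
        (fun next_list s => next_list ++ [(String.singleton s, g)]) next_list)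
    []

theorem expand_lsystem_eq_foldl (axiom_ : String) (rules : List (String × String)) (iterations : Int) :
    expand_lsystem axiom_ rules iterations =
      (PySem.List.pyRange 1 (iterations + 1) 1).foldl
        (fun cur g => pvStepA rules g cur)
        (axiom_.toList.map (fun s => (String.singleton s, (0 : Int)))) := rfl

theorem pvStepA_eq (rules : List (String × String)) (g : Int) (cur : List (String × Int)) :
    pvStepA rules g cur = (pvStepS rules (cur.map Prod.fst)).map (fun s => (s, g)) := by
  simp [pvStepA, pvStepS, pvRepl,
        pvFlattenMapSingleton, List.flatMap, List.map_map, Function.comp_def]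

theorem pvFold_syms (rules : List (String × String)) :
    ∀ (gs : List Int) (cur : List (String × Int)),
      ((gs.foldl (fun cur g => pvStepA rules g cur) cur).map Prod.fst) =
        pvIterS rules gs.length (cur.map Prod.fst) := by
  intro gs
  induction gs with
  | nil => intro cur; rfl
  | cons g gs ih =>
      intro cur
      have := ih (pvStepA rules g cur)
      simp only [List.foldl_cons, List.length_cons] at this ⊢
      rw [this, pvStepA_eq]
      simp [pvIterS, List.map_map, Function.comp_def]

theorem pvIterS_succ' (rules : List (String × String)) (k : Nat) (L : List String) :
    pvIterS rules (k + 1) L = pvStepS rules (pvIterS rules k L) := by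
  induction k generalizing L with
  | zero => rfl
  | succ k ih => exact ih (pvStepS rules L)

-- spec of the table entries: the k-step expansion of one symbol
def pvExpandN (rules : List (String × String)) : Nat → String → List String
  | 0, s => [s]
  | k + 1, s => (pvRepl rules s).flatMap (pvExpandN rules k)

theorem pvExpandN_flatMap (rules : List (String × String)) :
    ∀ (k : Nat) (L : List String), L.flatMap (pvExpandN rules k) = pvIterS rules k L := by
  intro k
  induction k with
  | zero =>
      intro L
      simp [pvExpandN, pvIterS, List.flatMap, pvFlattenMapSingleton]
  | succ k ih =>
      intro L
      calc L.flatMap (pvExpandN rules (k + 1))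
          = L.flatMap (fun s => (pvRepl rules s).flatMap (pvExpandN rules k)) := rfl
        _ = (pvStepS rules L).flatMap (pvExpandN rules k) := by
            simp [pvStepS, List.flatMap_assoc]
        _ = pvIterS rules k (pvStepS rules L) := ih _
        _ = pvIterS rules (k + 1) L := rfl

theorem pvGetD_build_of_not_mem {ν : Type} (l : List String) (f : String → ν)
    (d : PySem.Dict String ν) (c : String) (v : ν) (h : c ∉ l) :
    (l.foldl (fun t x => t.insert x (f x)) d).getD c v = d.getD c v := by
  induction l generalizing d with
  | nil => rfl
  | cons x l ih =>
      simp only [List.foldl_cons]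
      rw [ih _ (by simp at h; exact h.2), PySem.Dict.getD_insert_of_ne _ _ _ (by simp at h; exact h.1)]

theorem pvGetD_build_of_mem {ν : Type} (l : List String) (f : String → ν)
    (d : PySem.Dict String ν) (c : String) (v : ν) (h : c ∈ l) :
    (l.foldl (fun t x => t.insert x (f x)) d).getD c v = f c := by
  induction l generalizing d with
  | nil => cases h
  | cons x l ih =>
      simp only [List.foldl_cons]
      by_cases hl : c ∈ l
      · exact ih _ hl
      · have hx : c = x := by
          rcases List.mem_cons.mp h with h' | h'
          · exact h'
          · exact absurd h' hl
        subst hx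
        rw [pvGetD_build_of_not_mem _ _ _ _ _ hl, PySem.Dict.getD_insert_self]

-- the replacement of a singleton character comes from a rule value, or is the character itself
theorem pvRepl_chars (rules : List (String × String)) (ch : Char) (d : Char)
    (hd : d ∈ ((PySem.Dict.mk rules).getD (String.singleton ch) (String.singleton ch)).toList) :
    (∃ p ∈ rules, d ∈ p.2.toList) ∨ d = ch := by
  rcases hv : (PySem.Dict.mk rules).get? (String.singleton ch) with _ | v
  · right
    rw [PySem.Dict.getD_of_get?_eq_none _ _ hv] at hd
    simpa using hd
  · left
    have hmem : (String.singleton ch, v) ∈ (PySem.Dict.mk rules).items :=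
      PySem.Dict.mem_items_of_get?_eq_some _ hv
    rw [PySem.Dict.getD_of_get?_eq_some _ _ hv] at hd
    exact ⟨(String.singleton ch, v), hmem, hd⟩

-- every candidate is a singleton string
theorem pvUniv_singleton (axiom_ : String) (rules : List (String × String)) (c : String)
    (hc : c ∈ pvUniv axiom_ rules) : ∃ ch : Char, c = String.singleton ch := by
  rw [pvUniv, List.mem_append] at hc
  rcases hc with h | h
  · rcases List.mem_map.mp h with ⟨ch, _, rfl⟩
    exact ⟨ch, rfl⟩
  · rcases List.mem_flatMap.mp h with ⟨p, _, hp⟩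
    rcases List.mem_map.mp hp with ⟨ch, _, rfl⟩
    exact ⟨ch, rfl⟩

-- Set.add, concretely
theorem pvAdd_eq (s : List String) (x : String) :
    PySem.Set.add s x = if x ∈ s then s else s ++ [x] := by
  simp [PySem.Set.add]

theorem pvFoldlAdd_prefix (L : List String) :
    ∀ s : List String, ∃ E, L.foldl PySem.Set.add s = s ++ E := by
  induction L with
  | nil => intro s; exact ⟨[], by simp⟩
  | cons x L ih =>
      intro s
      rcases ih (PySem.Set.add s x) with ⟨E, hE⟩
      by_cases hx : x ∈ s
      · exact ⟨E, by simp only [List.foldl_cons]; rw [hE, pvAdd_eq, if_pos hx]⟩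
      · exact ⟨[x] ++ E, by simp only [List.foldl_cons]; rw [hE, pvAdd_eq, if_neg hx, List.append_assoc]⟩

theorem pvOfListAppend_prefix (R L : List String) (h : R.Nodup) :
    ∃ E, PySem.Set.ofList (R ++ L) = R ++ E := by
  have hself : PySem.Set.ofList R = R := PySem.Set.ofList_eq_self_of_nodup R h
  rw [PySem.Set.ofList_eq_foldl, List.foldl_append, ← PySem.Set.ofList_eq_foldl, hself]
  exact pvFoldlAdd_prefix L R

theorem pvStepR_prefix (rules : List (String × String)) (R : List String) (h : R.Nodup) :
    ∃ E, pvStepR rules R = R ++ E :=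
  pvOfListAppend_prefix R _ h

theorem pvStepR_subset (axiom_ : String) (rules : List (String × String)) (R : List String)
    (hsub : R ⊆ pvUniv axiom_ rules) : pvStepR rules R ⊆ pvUniv axiom_ rules := by
  intro x hx
  rw [pvStepR, PySem.Set.mem_ofList, List.mem_append] at hx
  rcases hx with h | h
  · exact hsub h
  · rcases List.mem_flatMap.mp h with ⟨c, hcR, hx⟩
    rcases List.mem_map.mp hx with ⟨d, hd, rfl⟩
    rcases pvUniv_singleton axiom_ rules c (hsub hcR) with ⟨ch, rfl⟩
    rcases pvRepl_chars rules ch d hd with ⟨p, hp, hdp⟩ | rfl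
    · rw [pvUniv]
      exact List.mem_append_right _
        (List.mem_flatMap.mpr ⟨p, hp, List.mem_map.mpr ⟨d, hdp, rfl⟩⟩)
    · exact hsub hcR

theorem pvIterR_inv (axiom_ : String) (rules : List (String × String)) :
    ∀ (k : Nat) (R : List String), R.Nodup → R ⊆ pvUniv axiom_ rules →
      (pvIterR rules k R).Nodup ∧ pvIterR rules k R ⊆ pvUniv axiom_ rules := by
  intro k
  induction k with
  | zero => intro R h1 h2; exact ⟨h1, h2⟩
  | succ k ih =>
      intro R h1 h2
      exact ih (pvStepR rules R) (PySem.Set.nodup_ofList _) (pvStepR_subset axiom_ rules R h2)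

theorem pvIterR_prefix (rules : List (String × String)) :
    ∀ (k : Nat) (R : List String), R.Nodup → ∃ E, pvIterR rules k R = R ++ E := by
  intro k
  induction k with
  | zero => intro R _; exact ⟨[], by simp [pvIterR]⟩
  | succ k ih =>
      intro R h
      rcases pvStepR_prefix rules R h with ⟨E1, h1⟩
      have hnd : (R ++ E1).Nodup := h1 ▸ PySem.Set.nodup_ofList _
      rcases ih (R ++ E1) hnd with ⟨E2, h2⟩
      exact ⟨E1 ++ E2, by
        show pvIterR rules k (pvStepR rules R) = R ++ (E1 ++ E2)
        rw [h1, h2, List.append_assoc]⟩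

theorem pvIterR_fix (rules : List (String × String)) (R : List String)
    (h : pvStepR rules R = R) : ∀ m, pvIterR rules m R = R := by
  intro m
  induction m with
  | zero => rfl
  | succ m ih =>
      show pvIterR rules m (pvStepR rules R) = R
      rw [h]; exact ih

theorem pvNodupSubsetLength (R U : List String) (h1 : R.Nodup) (h2 : R ⊆ U) :
    R.length ≤ U.length := by
  calc R.length = R.toFinset.card := (List.toFinset_card_of_nodup h1).symm
    _ ≤ U.toFinset.card := Finset.card_le_card
        (fun x hx => List.mem_toFinset.mpr (h2 (List.mem_toFinset.mp hx)))
    _ ≤ U.length := List.toFinset_card_le U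

-- pigeonhole: after enough steps the monotone reachability iteration is a fixed point
theorem pvReach_pigeon (axiom_ : String) (rules : List (String × String)) :
    ∀ (k : Nat) (R : List String), R.Nodup → R ⊆ pvUniv axiom_ rules →
      (PySem.Set.ofList (pvUniv axiom_ rules)).length < R.length + k →
      pvStepR rules (pvIterR rules k R) = pvIterR rules k R := by
  intro k
  induction k with
  | zero =>
      intro R h1 h2 hlt
      exfalso
      have hsub : R ⊆ PySem.Set.ofList (pvUniv axiom_ rules) := by
        intro x hx; rw [PySem.Set.mem_ofList]; exact h2 hx
      have := pvNodupSubsetLength R _ h1 hsub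
      omega
  | succ k ih =>
      intro R h1 h2 hlt
      by_cases hfix : pvStepR rules R = R
      · rw [pvIterR_fix rules R hfix]
        exact hfix
      · rcases pvStepR_prefix rules R h1 with ⟨E, hE⟩
        have hEne : E ≠ [] := by
          intro h0; rw [h0, List.append_nil] at hE; exact hfix hE
        have hlen : R.length + 1 ≤ (pvStepR rules R).length := by
          rw [hE, List.length_append]
          have := List.length_pos_of_ne_nil hEne
          omega
        have := ih (pvStepR rules R) (PySem.Set.nodup_ofList _)
          (pvStepR_subset axiom_ rules R h2) (by omega)
        exact this

-- the computed reach set is closed under one replacement step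
theorem pvReach_fix (axiom_ : String) (rules : List (String × String)) :
    pvStepR rules
      (pvIterR rules (PySem.Set.ofList (pvUniv axiom_ rules)).length
        (PySem.Set.ofList (axiom_.toList.map String.singleton))) =
      pvIterR rules (PySem.Set.ofList (pvUniv axiom_ rules)).length
        (PySem.Set.ofList (axiom_.toList.map String.singleton)) := by
  by_cases hax : axiom_.toList = []
  · have hnil : PySem.Set.ofList (axiom_.toList.map String.singleton) = ([] : List String) := by
      rw [hax]; rfl
    rw [hnil]
    have hstep : pvStepR rules ([] : List String) = [] := by rfl
    rw [pvIterR_fix rules [] hstep]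
    exact hstep
  · apply pvReach_pigeon
    · exact PySem.Set.nodup_ofList _
    · intro x hx
      rw [PySem.Set.mem_ofList] at hx
      rw [pvUniv]
      exact List.mem_append_left _ hx
    · have hmem : String.singleton (axiom_.toList.head hax) ∈
          PySem.Set.ofList (axiom_.toList.map String.singleton) := by
        rw [PySem.Set.mem_ofList]
        exact List.mem_map.mpr ⟨_, List.head_mem hax, rfl⟩
      have := List.length_pos_of_ne_nil (List.ne_nil_of_mem hmem)
      omega

-- members of reach
theorem pvReach_axiom (axiom_ : String) (rules : List (String × String)) (ch : Char)
    (hch : ch ∈ axiom_.toList) :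
    String.singleton ch ∈
      pvIterR rules (PySem.Set.ofList (pvUniv axiom_ rules)).length
        (PySem.Set.ofList (axiom_.toList.map String.singleton)) := by
  rcases pvIterR_prefix rules (PySem.Set.ofList (pvUniv axiom_ rules)).length
      (PySem.Set.ofList (axiom_.toList.map String.singleton))
      (PySem.Set.nodup_ofList _) with ⟨E, hE⟩
  rw [hE]
  apply List.mem_append_left
  rw [PySem.Set.mem_ofList]
  exact List.mem_map.mpr ⟨ch, hch, rfl⟩

theorem pvReach_singleton (axiom_ : String) (rules : List (String × String)) (c : String)
    (hc : c ∈ pvIterR rules (PySem.Set.ofList (pvUniv axiom_ rules)).length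
        (PySem.Set.ofList (axiom_.toList.map String.singleton))) :
    ∃ ch : Char, c = String.singleton ch := by
  have hsub := (pvIterR_inv axiom_ rules (PySem.Set.ofList (pvUniv axiom_ rules)).length
    (PySem.Set.ofList (axiom_.toList.map String.singleton))
    (PySem.Set.nodup_ofList _)
    (by intro x hx; rw [PySem.Set.mem_ofList] at hx; rw [pvUniv]; exact List.mem_append_left _ hx)).2
  exact pvUniv_singleton axiom_ rules c (hsub hc)

theorem pvReach_closed (axiom_ : String) (rules : List (String × String)) (ch : Char)
    (hch : String.singleton ch ∈
      pvIterR rules (PySem.Set.ofList (pvUniv axiom_ rules)).length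
        (PySem.Set.ofList (axiom_.toList.map String.singleton)))
    (d : Char)
    (hd : d ∈ ((PySem.Dict.mk rules).getD (String.singleton ch) (String.singleton ch)).toList) :
    String.singleton d ∈
      pvIterR rules (PySem.Set.ofList (pvUniv axiom_ rules)).length
        (PySem.Set.ofList (axiom_.toList.map String.singleton)) := by
  rw [← pvReach_fix axiom_ rules]
  rw [pvStepR, PySem.Set.mem_ofList, List.mem_append]
  right
  exact List.mem_flatMap.mpr ⟨String.singleton ch, hch, List.mem_map.mpr ⟨d, hd, rfl⟩⟩

-- the loop invariant: after k steps every alphabet entry holds its k-step expansion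
theorem pvIterT_invariant (rules : List (String × String)) (alph : List String)
    (hsing : ∀ c ∈ alph, ∃ ch : Char, c = String.singleton ch)
    (hclosed : ∀ ch : Char, String.singleton ch ∈ alph →
      ∀ d ∈ ((PySem.Dict.mk rules).getD (String.singleton ch) (String.singleton ch)).toList,
        String.singleton d ∈ alph) :
    ∀ (k j : Nat) (t : PySem.Dict String (List String)),
      (∀ c ∈ alph, t.getD c [] = pvExpandN rules j c) →
      ∀ c ∈ alph, (pvIterT rules alph k t).getD c [] = pvExpandN rules (k + j) c := by
  intro k
  induction k with
  | zero => intro j t ht c hc; simpa using ht c hc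
  | succ k ih =>
      intro j t ht c hc
      have hstep : ∀ c ∈ alph, (pvStepT rules alph t).getD c [] = pvExpandN rules (j + 1) c := by
        intro c hc
        rcases hsing c hc with ⟨ch, rfl⟩
        unfold pvStepT
        rw [pvGetD_build_of_mem _ _ _ _ _ hc]
        calc ((PySem.Dict.mk rules).getD (String.singleton ch) (String.singleton ch)).toList.flatMap
              (fun d => t.getD (String.singleton d) [])
            = ((PySem.Dict.mk rules).getD (String.singleton ch) (String.singleton ch)).toList.flatMap
              (fun d => pvExpandN rules j (String.singleton d)) := by
              apply List.flatMap_congr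
              intro d hd
              exact ht _ (hclosed ch hc d hd)
          _ = (pvRepl rules (String.singleton ch)).flatMap (pvExpandN rules j) := by
              rw [pvRepl, List.flatMap_map]
          _ = pvExpandN rules (j + 1) (String.singleton ch) := rfl
      have := ih (j + 1) _ hstep c hc
      rw [show k + (j + 1) = k + 1 + j by omega] at this
      exact this

theorem pvAlt_eq (axiom_ : String) (rules : List (String × String)) (iterations : Int) :
    expand_lsystem_alt axiom_ rules iterations =
      (pvIterS rules iterations.toNat (axiom_.toList.map String.singleton)).map
        (fun s => (s, max iterations 0)) := by
  unfold expand_lsystem_alt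
  have ht0 : ∀ c ∈ pvIterR rules (PySem.Set.ofList (pvUniv axiom_ rules)).length
      (PySem.Set.ofList (axiom_.toList.map String.singleton)),
      ((pvIterR rules (PySem.Set.ofList (pvUniv axiom_ rules)).length
          (PySem.Set.ofList (axiom_.toList.map String.singleton))).foldl
        (fun t c => t.insert c [c]) PySem.Dict.empty).getD c [] = pvExpandN rules 0 c := by
    intro c hc
    exact pvGetD_build_of_mem _ (fun c => [c]) _ _ _ hc
  have htab := pvIterT_invariant rules _
    (pvReach_singleton axiom_ rules) (pvReach_closed axiom_ rules)
    iterations.toNat 0 _ ht0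
  have hbody : axiom_.toList.flatMap
      (fun c => (pvIterT rules
          (pvIterR rules (PySem.Set.ofList (pvUniv axiom_ rules)).length
            (PySem.Set.ofList (axiom_.toList.map String.singleton)))
          iterations.toNat
          ((pvIterR rules (PySem.Set.ofList (pvUniv axiom_ rules)).length
            (PySem.Set.ofList (axiom_.toList.map String.singleton))).foldl
            (fun t c => t.insert c [c]) PySem.Dict.empty)).getD (String.singleton c) []) =
      axiom_.toList.flatMap (fun c => pvExpandN rules iterations.toNat (String.singleton c)) := by
    apply List.flatMap_congr
    intro ch hch
    have := htab (String.singleton ch) (pvReach_axiom axiom_ rules ch hch)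
    simpa using this
  simp only []
  rw [hbody, ← List.flatMap_map (f := String.singleton)
        (g := fun s => pvExpandN rules iterations.toNat s),
      pvExpandN_flatMap]

-- ===== VERDICT (by name: the statement is the Claim_ definition above) =====
theorem expand_lsystem_spec : Claim_equal_expand_lsystem := by
  intro axiom_ rules iterations _
  unfold Spec_expand_lsystem
  rw [expand_lsystem_eq_foldl, pvAlt_eq]
  by_cases h : iterations ≤ 0
  · rw [PySem.List.pyRange_one_eq_nil (by omega)]
    have h0 : iterations.toNat = 0 := by omega
    have hm : max iterations 0 = 0 := by omega
    simp [h0, hm, pvIterS]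
  · have h1 : (1 : Int) ≤ iterations := by omega
    rw [PySem.List.pyRange_one_succ_right h1, List.foldl_append]
    simp only [List.foldl_cons, List.foldl_nil]
    rw [pvStepA_eq, pvFold_syms, PySem.List.length_pyRange_one]
    have hk : iterations.toNat = (iterations - 1).toNat + 1 := by omega
    rw [hk, pvIterS_succ']
    have hm : max iterations 0 = iterations := by omega
    rw [hm]
    simp [List.map_map, Function.comp_def]
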